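-- pv_equiv track=rewrite | github.com/nguyenngochuy91/class_projects | CS_569_ProteinStructure/project/retrieve_coordinate.py | get_intersection_bags
-- ===== SOURCE A (Python) =====
-- def get_intersection_bags(gene_pdb_bags,operon, operon_list):
--     dic ={}
--     for operon_name in operon_list:
--         intersection = gene_pdb_bags[operon[operon_name][0]] # get the bags of structure of the first gene in the operon
--         for gene in operon[operon_name][1:]:
--             intersection = intersection & gene_pdb_bags[gene]
--         if len(intersection)!=0 :
--             dic[operon_name] = intersection
--     return dic
-- ===== SOURCE B (Python) =====
-- def get_intersection_bags(gene_pdb_bags, operon, operon_list):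
--     dic = {}
--     for operon_name in operon_list:
--         genes = operon[operon_name]
--         counts = {}
--         for gene in genes:
--             for structure in gene_pdb_bags[gene]:
--                 counts[structure] = counts.get(structure, 0) + 1
--         intersection = {s for s, c in counts.items() if c == len(genes)}
--         if intersection:
--             dic[operon_name] = intersection
--     return dic
-- ===== Notes on version B (the rewrite author's own statement) =====
-- stated objective: alternative
-- what changed: Replaces the pairwise fold of set intersections with a single counting pass: one occurrence tally over all genes' bags per operon, keeping the structures whose count equals the number of genes.
import Mathlib
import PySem

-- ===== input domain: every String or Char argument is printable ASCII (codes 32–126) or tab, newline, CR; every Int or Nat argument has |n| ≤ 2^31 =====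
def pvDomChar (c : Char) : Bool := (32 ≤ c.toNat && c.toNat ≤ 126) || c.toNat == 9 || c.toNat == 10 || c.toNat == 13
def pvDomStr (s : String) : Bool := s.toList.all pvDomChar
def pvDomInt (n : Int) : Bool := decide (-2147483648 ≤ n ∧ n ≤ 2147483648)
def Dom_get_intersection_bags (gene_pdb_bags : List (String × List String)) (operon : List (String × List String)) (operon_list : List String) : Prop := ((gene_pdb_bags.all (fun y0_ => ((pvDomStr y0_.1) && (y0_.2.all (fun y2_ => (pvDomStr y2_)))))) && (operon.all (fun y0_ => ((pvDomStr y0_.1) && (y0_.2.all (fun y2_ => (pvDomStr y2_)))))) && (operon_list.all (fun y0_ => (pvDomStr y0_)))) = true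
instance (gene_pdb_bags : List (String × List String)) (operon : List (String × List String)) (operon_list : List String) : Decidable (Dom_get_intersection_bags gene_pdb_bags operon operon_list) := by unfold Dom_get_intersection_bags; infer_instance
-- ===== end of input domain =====

-- B replaces A's pairwise fold of set intersections by a single counting pass per operon
-- (tally every structure across all that operon's bags, keep those counted once per gene);
-- equivalence of the RETURN value is proved (for single-gene operons A returns the first
-- gene's set object itself while B builds a fresh set — same value, different identity).

-- ===== PORT A =====
-- dict lookup d[k] (KeyError → excluded by Pre_); both dicts are modelled as their item lists
def pvGet (d : List (String × List String)) (k : String) : List String :=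
  (PySem.Dict.mk d).getD k []

def get_intersection_bags (gene_pdb_bags : List (String × List String)) (operon : List (String × List String)) (operon_list : List String) : List (String × List String) :=
  (operon_list.foldl (fun dic operon_name =>
      -- intersection = gene_pdb_bags[operon[operon_name][0]]  (a Python set value → PySem.Set)
      let genes := pvGet operon operon_name
      let intersection0 : PySem.Set String :=
        PySem.Set.ofList (pvGet gene_pdb_bags (PySem.List.pyGetD genes 0 ""))
      -- for gene in operon[operon_name][1:]: intersection = intersection & gene_pdb_bags[gene]
      let intersection :=
        (PySem.List.slice genes (some 1) none).foldl
          (fun acc gene => PySem.Set.inter acc (PySem.Set.ofList (pvGet gene_pdb_bags gene)))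
          intersection0
      -- if len(intersection)!=0 : dic[operon_name] = intersection
      if intersection.length ≠ 0 then dic.insert operon_name intersection else dic)
    PySem.Dict.empty).items

-- ===== PORT B =====
def get_intersection_bags_alt (gene_pdb_bags : List (String × List String)) (operon : List (String × List String)) (operon_list : List String) : List (String × List String) :=
  (operon_list.foldl (fun dic operon_name =>
      let genes := pvGet operon operon_name
      -- counts[structure] = counts.get(structure, 0) + 1 over every structure of every gene's bag
      let counts : PySem.Dict String Int :=
        genes.foldl (fun c gene =>
            (PySem.Set.ofList (pvGet gene_pdb_bags gene)).foldl
              (fun c s => c.insert s (c.getD s 0 + 1)) c)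
          PySem.Dict.empty
      -- {s for s, c in counts.items() if c == len(genes)}
      let intersection : PySem.Set String :=
        PySem.Set.ofList
          (((counts.items.filter (fun p => p.2 == (genes.length : Int))).map (·.1)))
      -- if intersection: dic[operon_name] = intersection
      if intersection.length ≠ 0 then dic.insert operon_name intersection else dic)
    PySem.Dict.empty).items

-- ===== PRECONDITION & SPEC =====
-- Pre_ excludes exactly the inputs where the Python A raises: an operon_list name missing
-- from operon (KeyError), an operon with an empty gene list (IndexError on genes[0]), or a
-- listed gene missing from gene_pdb_bags (KeyError).
def Pre_get_intersection_bags (gene_pdb_bags : List (String × List String)) (operon : List (String × List String)) (operon_list : List String) : Prop :=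
  (operon_list.all (fun operon_name =>
    (PySem.Dict.mk operon).contains operon_name &&
    (let genes := pvGet operon operon_name
     !genes.isEmpty && genes.all (fun gene => (PySem.Dict.mk gene_pdb_bags).contains gene)))) = true
instance (gene_pdb_bags : List (String × List String)) (operon : List (String × List String)) (operon_list : List String) : Decidable (Pre_get_intersection_bags gene_pdb_bags operon operon_list) := by unfold Pre_get_intersection_bags; infer_instance

def pvWitness_get_intersection_bags : (List (String × List String)) × (List (String × List String)) × List String :=
  ([("g1", ["s1", "s2"]), ("g2", ["s2", "s3"])], [("op1", ["g1", "g2"])], ["op1"])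

def Spec_get_intersection_bags (gene_pdb_bags : List (String × List String)) (operon : List (String × List String)) (operon_list : List String) (out : List (String × List String)) : Prop := out = get_intersection_bags_alt gene_pdb_bags operon operon_list
instance (gene_pdb_bags : List (String × List String)) (operon : List (String × List String)) (operon_list : List String) (out : List (String × List String)) : Decidable (Spec_get_intersection_bags gene_pdb_bags operon operon_list out) := by unfold Spec_get_intersection_bags; infer_instance

-- ===== CLAIM (what is proved, stated in full; the proofs are below) =====
def Claim_equal_get_intersection_bags : Prop := ∀ (gene_pdb_bags : List (String × List String)) (operon : List (String × List String)) (operon_list : List String), Dom_get_intersection_bags gene_pdb_bags operon operon_list → Pre_get_intersection_bags gene_pdb_bags operon operon_list → Spec_get_intersection_bags gene_pdb_bags operon operon_list (get_intersection_bags gene_pdb_bags operon operon_list)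

-- ===== LEMMAS AND PROOFS =====

theorem pv_contains_ofList (l : List String) (s : String) :
    (PySem.Set.ofList l).contains s = l.contains s := by
  by_cases h : s ∈ l <;> simp [h, PySem.Set.mem_ofList]

-- A's inner loop: a fold of pairwise intersections filters the start set by membership in every bag
theorem pv_interA (bags : List (String × List String)) (gs : List String) (S : List String) :
    gs.foldl (fun acc g => PySem.Set.inter acc (PySem.Set.ofList (pvGet bags g))) S
      = S.filter (fun s => gs.all (fun g => (pvGet bags g).contains s)) := by
  induction gs generalizing S with
  | nil => simp
  | cons g gs ih =>
      simp only [List.foldl_cons]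
      rw [ih]
      simp only [PySem.Set.inter, List.filter_filter]
      apply List.filter_congr
      intro s _
      simp [Bool.and_comm]

-- the multiplicity of k in the concatenation of the (duplicate-free) bags counts the genes whose bag holds k
theorem pv_count (bags : List (String × List String)) (genes : List String) (k : String) :
    ((genes.map (fun g => PySem.Set.ofList (pvGet bags g))).flatten.count k : Int)
      = (genes.countP (fun g => (pvGet bags g).contains k) : Int) := by
  rw [List.count_flatten, List.map_map]
  congr 1
  rw [← PySem.List.sum_map_ite_one_zero_nat (fun g => (pvGet bags g).contains k) genes]
  congr 1
  apply List.map_congr_left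
  intro g _
  by_cases h : k ∈ pvGet bags g
  · have hm : k ∈ PySem.Set.ofList (pvGet bags g) := (PySem.Set.mem_ofList _ _).mpr h
    simp [Function.comp, h]
  · have hm : k ∉ PySem.Set.ofList (pvGet bags g) := fun hc => h ((PySem.Set.mem_ofList _ _).mp hc)
    simp [Function.comp, List.count_eq_zero_of_not_mem hm, h]

-- B's inner loops: the counting pass followed by the count = len(genes) filter
theorem pv_interB (bags : List (String × List String)) (genes : List String) :
    ((((genes.foldl (fun c gene =>
          (PySem.Set.ofList (pvGet bags gene)).foldl
            (fun c s => c.insert s (c.getD s 0 + 1)) c)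
          PySem.Dict.empty).items.filter (fun p => p.2 == (genes.length : Int))).map (·.1)))
      = (PySem.Set.ofList (genes.map (fun g => PySem.Set.ofList (pvGet bags g))).flatten).filter
          (fun s => genes.all (fun g => (pvGet bags g).contains s)) := by
  have h1 : (genes.foldl (fun c gene =>
          (PySem.Set.ofList (pvGet bags gene)).foldl
            (fun c s => c.insert s (c.getD s 0 + 1)) c)
          PySem.Dict.empty)
      = PySem.Dict.counter (genes.map (fun g => PySem.Set.ofList (pvGet bags g))).flatten := by
    rw [← PySem.Dict.foldl_insert_getD_add_one_eq_counter, List.foldl_flatten, List.foldl_map]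
  rw [h1, PySem.Dict.items_counter, List.filter_map, List.map_map]
  have h2 : ((fun p : String × Int => p.1) ∘ fun k => (k, ((genes.map (fun g => PySem.Set.ofList (pvGet bags g))).flatten.count k : Int))) = id := rfl
  rw [h2, List.map_id]
  apply List.filter_congr
  intro k _
  rw [Bool.eq_iff_iff]
  simp only [Function.comp, beq_iff_eq, pv_count, Int.natCast_inj, List.all_eq_true]
  exact List.countP_eq_length

-- per-operon: on a non-empty gene list both inner computations produce the same element list
theorem pv_inter_eq (bags : List (String × List String)) (g0 : String) (gs : List String) :
    ((gs.foldl (fun acc gene => PySem.Set.inter acc (PySem.Set.ofList (pvGet bags gene)))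
        (PySem.Set.ofList (pvGet bags g0))) : List String)
      = PySem.Set.ofList
          (((((g0 :: gs).foldl (fun c gene =>
                (PySem.Set.ofList (pvGet bags gene)).foldl
                  (fun c s => c.insert s (c.getD s 0 + 1)) c)
                PySem.Dict.empty).items.filter
                  (fun p => p.2 == ((g0 :: gs).length : Int))).map (·.1))) := by
  rw [pv_interB, pv_interA]
  have hsplit : ((g0 :: gs).map (fun g => PySem.Set.ofList (pvGet bags g))).flatten
      = PySem.Set.ofList (pvGet bags g0) ++ (gs.map (fun g => PySem.Set.ofList (pvGet bags g))).flatten := by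
    simp
  rw [hsplit, PySem.Set.ofList_append, PySem.Set.ofList_ofList, PySem.Set.update_eq_append_filter,
    List.filter_append]
  have hright : (((PySem.Set.ofList ((gs.map (fun g => PySem.Set.ofList (pvGet bags g))).flatten)).filter
        (fun y => !(PySem.Set.ofList (pvGet bags g0)).contains y)).filter
        (fun s => (g0 :: gs).all (fun g => (pvGet bags g).contains s))) = [] := by
    rw [List.filter_eq_nil_iff]
    intro y hy
    have hnot : ¬ y ∈ pvGet bags g0 := by
      have := List.of_mem_filter hy
      simp only [Bool.not_eq_eq_eq_not, Bool.not_true] at this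
      intro hmem
      rw [pv_contains_ofList] at this
      simp [hmem] at this
    simp only [List.all_cons, Bool.and_eq_true, List.contains_iff_mem]
    intro hc
    exact hnot (by simpa [List.contains_iff_mem] using hc.1)
  rw [hright, List.append_nil]
  have hleft : ((PySem.Set.ofList (pvGet bags g0)).filter
        (fun s => (g0 :: gs).all (fun g => (pvGet bags g).contains s)))
      = ((PySem.Set.ofList (pvGet bags g0)).filter
        (fun s => gs.all (fun g => (pvGet bags g).contains s))) := by
    apply List.filter_congr
    intro s hs
    have hmem : s ∈ pvGet bags g0 := (PySem.Set.mem_ofList _ _).mp hs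
    simp [hmem]
  rw [hleft]
  exact (PySem.Set.ofList_eq_self_of_nodup _ (List.Nodup.filter _ (PySem.Set.nodup_ofList _))).symm

-- ===== VERDICT (by name: the statement is the Claim_ definition above) =====
theorem get_intersection_bags_spec : Claim_equal_get_intersection_bags := by
  intro bags operon operon_list _ hpre
  unfold Spec_get_intersection_bags get_intersection_bags get_intersection_bags_alt
  congr 1
  apply PySem.List.foldl_congr_mem
  intro dic name hname
  unfold Pre_get_intersection_bags at hpre
  rw [List.all_eq_true] at hpre
  have h := hpre name hname
  simp only [Bool.and_eq_true, Bool.not_eq_eq_eq_not, Bool.not_true] at h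
  obtain ⟨-, hne, -⟩ := h
  obtain ⟨g0, gs, hgenes⟩ := List.exists_cons_of_ne_nil (l := pvGet operon name) (by
    intro hnil; rw [hnil] at hne; simp at hne)
  simp only [hgenes]
  have hfirst : PySem.List.pyGetD (g0 :: gs) 0 "" = g0 := by
    simp [PySem.List.pyGetD, PySem.List.pyGet?, PySem.List.pyIdx?]
  have hslice : PySem.List.slice (g0 :: gs) (some 1) none = gs := by
    simp [pysem]
  rw [hfirst, hslice, pv_inter_eq bags g0 gs]
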